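-- pv_equiv track=rewrite | github.com/bilfor/autowatch | schedule.py | modify_hour
-- ===== SOURCE A (Python) =====
-- def modify_hour(input_list, operation, number):
--     if operation not in ('add', 'subtract'):
--         raise ValueError("Invalid operation. Choose 'add' or 'subtract'.")
--
--     modified_list = []
--     for element in input_list:
--         numbers = element.split()
--         modified_element = ''
--         count = 0
--         for number_str in numbers:
--             if number_str.isdigit():
--                 count += 1
--                 if count == 2:  # Second number encountered
--                     if operation == 'add':
--                         modified_element += str(int(number_str) + number) + ' '
--                     elif operation == 'subtract':
--                         modified_element += str(int(number_str) - number) + ' '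
--                 else:
--                     modified_element += number_str + ' '
--             else:
--                 modified_element += number_str + ' '
--         modified_list.append(modified_element.strip())  # Remove trailing space
--     return modified_list
-- ===== SOURCE B (Python) =====
-- def modify_hour(input_list, operation, number):
--     if operation not in ('add', 'subtract'):
--         raise ValueError("Invalid operation. Choose 'add' or 'subtract'.")
--     delta = number if operation == 'add' else -number
--     result = []
--     for element in input_list:
--         tokens = element.split()
--         digit_positions = [i for i, tok in enumerate(tokens) if tok.isdigit()]
--         if len(digit_positions) >= 2:
--             j = digit_positions[1]
--             tokens[j] = str(int(tokens[j]) + delta)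
--         result.append(' '.join(tokens))
--     return result
-- ===== Notes on version B (the rewrite author's own statement) =====
-- stated objective: simpler
-- what changed: Instead of A's running digit-count with a space-appending string accumulator that is stripped at the end, B builds the token list once, locates the second numeric token through an index table of digit positions, replaces it in place, and rebuilds each element with ' '.join.
import Mathlib
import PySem

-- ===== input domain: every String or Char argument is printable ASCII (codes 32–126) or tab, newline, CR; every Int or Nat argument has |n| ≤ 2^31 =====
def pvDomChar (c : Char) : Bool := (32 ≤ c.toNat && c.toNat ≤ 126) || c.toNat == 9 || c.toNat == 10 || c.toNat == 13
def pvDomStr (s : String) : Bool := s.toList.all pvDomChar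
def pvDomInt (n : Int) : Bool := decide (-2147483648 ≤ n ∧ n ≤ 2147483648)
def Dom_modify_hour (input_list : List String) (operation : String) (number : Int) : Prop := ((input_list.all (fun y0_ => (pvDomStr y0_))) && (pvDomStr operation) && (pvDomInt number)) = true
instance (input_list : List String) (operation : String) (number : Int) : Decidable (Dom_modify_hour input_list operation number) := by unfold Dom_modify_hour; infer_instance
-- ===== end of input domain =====

-- B replaces A's running digit-count + space-appending string accumulator (stripped at the end) by an
-- index table of digit-token positions, an in-place replacement of the second one, and ' '.join (objective: simpler).


-- ===== PORT A =====
-- A raises ValueError on an invalid operation (outside Pre_); the port returns [] there.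
def modify_hour (input_list : List String) (operation : String) (number : Int) : List String :=
  if ¬ (operation = "add" ∨ operation = "subtract") then []
  else
    input_list.foldl (fun modified_list element =>
      let numbers := PySem.Chars.split₀ element.toList
      let st := numbers.foldl (fun (st : List Char × Int) number_str =>
        let modified_element := st.1
        let count := st.2
        if PySem.Chars.strIsdigit number_str then
          let count := count + 1
          if count = 2 then
            if operation = "add" then
              (modified_element ++ PySem.Int.toChars ((PySem.Int.ofChars? number_str).getD 0 + number) ++ [' '], count)
            else if operation = "subtract" then
              (modified_element ++ PySem.Int.toChars ((PySem.Int.ofChars? number_str).getD 0 - number) ++ [' '], count)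
            else (modified_element, count)
          else (modified_element ++ number_str ++ [' '], count)
        else (modified_element ++ number_str ++ [' '], count)) ([], 0)
      modified_list ++ [String.mk (PySem.Chars.strip st.1)]) []

-- ===== PORT B =====
-- B raises the same ValueError on an invalid operation (outside Pre_); the port returns [] there.
def modify_hour_alt (input_list : List String) (operation : String) (number : Int) : List String :=
  if ¬ (operation = "add" ∨ operation = "subtract") then []
  else
    let delta : Int := if operation = "add" then number else -number
    input_list.foldl (fun result element =>
      let tokens := PySem.Chars.split₀ element.toList
      let digit_positions := (PySem.List.enumerate tokens).filterMap
        (fun p => if PySem.Chars.strIsdigit p.2 then some p.1 else none)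
      let tokens' := match digit_positions[1]? with
        | some j => (PySem.List.pySet? tokens j
            (PySem.Int.toChars ((PySem.Int.ofChars? ((PySem.List.pyGet? tokens j).getD [])).getD 0 + delta))).getD tokens
        | none => tokens
      result ++ [String.mk (PySem.Chars.join [' '] tokens')]) []

-- ===== PRECONDITION & SPEC =====
-- Pre_ excludes exactly the inputs on which A raises ValueError (operation not 'add'/'subtract').
def Pre_modify_hour (input_list : List String) (operation : String) (number : Int) : Prop :=
  operation = "add" ∨ operation = "subtract"
instance (input_list : List String) (operation : String) (number : Int) : Decidable (Pre_modify_hour input_list operation number) := by unfold Pre_modify_hour; infer_instance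
def pvWitness_modify_hour : List String × String × Int := (["abc 1 2 x"], "add", 3)

def Spec_modify_hour (input_list : List String) (operation : String) (number : Int) (out : List String) : Prop := out = modify_hour_alt input_list operation number
instance (input_list : List String) (operation : String) (number : Int) (out : List String) : Decidable (Spec_modify_hour input_list operation number out) := by unfold Spec_modify_hour; infer_instance

-- ===== CLAIM (what is proved, stated in full; the proofs are below) =====
def Claim_equal_modify_hour : Prop := ∀ (input_list : List String) (operation : String) (number : Int), Dom_modify_hour input_list operation number → Pre_modify_hour input_list operation number → Spec_modify_hour input_list operation number (modify_hour input_list operation number)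

-- ===== LEMMAS AND PROOFS =====

-- a token is good if it is nonempty and whitespace-free
def good (t : List Char) : Prop := t ≠ [] ∧ ∀ c ∈ t, PySem.Chars.isspace c = false

-- the replacement applied to the second digit token, as A computes it
def gop (operation : String) (number : Int) (t : List Char) : List Char :=
  if operation = "add" then PySem.Int.toChars ((PySem.Int.ofChars? t).getD 0 + number)
  else PySem.Int.toChars ((PySem.Int.ofChars? t).getD 0 - number)

-- specification middle ground: token list with the (2 - count)-th digit token replaced by g
def mark (g : List Char → List Char) (count : Int) : List (List Char) → List (List Char)
  | [] => []
  | t :: ts =>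
      if PySem.Chars.strIsdigit t then
        (if count + 1 = 2 then g t else t) :: mark g (count + 1) ts
      else t :: mark g count ts

-- tokens glued with a trailing space each (A's accumulator shape)
def sp : List (List Char) → List Char
  | [] => []
  | t :: ts => t ++ ' ' :: sp ts

-- digit-token positions as naturals (proof-side mirror of B's index table)
def dIdxN : List (List Char) → List Nat
  | [] => []
  | t :: ts =>
      if PySem.Chars.strIsdigit t then 0 :: (dIdxN ts).map (· + 1)
      else (dIdxN ts).map (· + 1)

theorem mark_ge2 (g : List Char → List Char) : ∀ (ts : List (List Char)) (c : Int), 2 ≤ c → mark g c ts = ts := by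
  intro ts
  induction ts with
  | nil => intro c h; rfl
  | cons t ts ih =>
    intro c h
    unfold mark
    have h2 : ¬ (c + 1 = 2) := by omega
    by_cases hd : PySem.Chars.strIsdigit t
    · simp [hd, h2, ih (c + 1) (by omega)]
    · simp [hd, ih c h]

theorem mark_mem (g : List Char → List Char) : ∀ (ts : List (List Char)) (c : Int) (u : List Char),
    u ∈ mark g c ts → u ∈ ts ∨ ∃ t ∈ ts, u = g t := by
  intro ts
  induction ts with
  | nil => intro c u h; simp [mark] at h
  | cons t ts ih =>
    intro c u h
    unfold mark at h
    by_cases hd : PySem.Chars.strIsdigit t <;> simp [hd] at h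
    · rcases h with h | h
      · by_cases h2 : c + 1 = 2 <;> simp [h2] at h
        · exact Or.inr ⟨t, by simp, h⟩
        · simp [h]
      · rcases ih (c + 1) u h with h' | ⟨v, hv, he⟩
        · simp [h']
        · exact Or.inr ⟨v, by simp [hv], he⟩
    · rcases h with h | h
      · simp [h]
      · rcases ih c u h with h' | ⟨v, hv, he⟩
        · simp [h']
        · exact Or.inr ⟨v, by simp [hv], he⟩

theorem dIdxN_lt : ∀ (ts : List (List Char)) (j : Nat), j ∈ dIdxN ts → j < ts.length := by
  intro ts
  induction ts with
  | nil => intro j h; simp [dIdxN] at h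
  | cons t ts ih =>
    intro j h
    unfold dIdxN at h
    by_cases hd : PySem.Chars.strIsdigit t <;> simp [hd] at h
    · rcases h with h | ⟨k, hk, he⟩
      · simp [h]
      · have := ih k hk; simp; omega
    · rcases h with ⟨k, hk, he⟩
      have := ih k hk; simp; omega

theorem dIdxN_cons (t : List Char) (ts : List (List Char)) :
    dIdxN (t :: ts) = if PySem.Chars.strIsdigit t then 0 :: (dIdxN ts).map (· + 1)
      else (dIdxN ts).map (· + 1) := rfl

theorem mark_cons (g : List Char → List Char) (c : Int) (t : List Char) (ts : List (List Char)) :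
    mark g c (t :: ts) = (if PySem.Chars.strIsdigit t then
        (if c + 1 = 2 then g t else t) :: mark g (c + 1) ts
      else t :: mark g c ts) := rfl

-- B's enumerate/filterMap index table is the cast of dIdxN
theorem dIdx_eq : ∀ (ts : List (List Char)) (s : Nat),
    (PySem.List.enumerate ts (s : Int)).filterMap
        (fun p => if PySem.Chars.strIsdigit p.2 then some p.1 else none)
      = (dIdxN ts).map (fun n => ((n + s : Nat) : Int)) := by
  intro ts
  induction ts with
  | nil => intro s; simp [PySem.List.enumerate_nil, dIdxN]
  | cons t ts ih =>
    intro s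
    rw [PySem.List.enumerate_cons, List.filterMap_cons]
    have hcast : ((s : Int) + 1) = ((s + 1 : Nat) : Int) := by push_cast; ring
    rw [dIdxN_cons]
    by_cases hd : PySem.Chars.strIsdigit t <;>
      simp only [hd, ite_true, ite_false, Bool.false_eq_true] <;>
      rw [hcast, ih (s + 1)] <;>
      simp [List.map_map, Function.comp] <;>
      exact fun n _ => by push_cast; omega

theorem setFirstN (g : List Char → List Char) : ∀ (ts : List (List Char)),
    mark g 1 ts = (match (dIdxN ts)[0]? with
      | some j => ts.set j (g (ts[j]?.getD []))
      | none => ts) := by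
  intro ts
  induction ts with
  | nil => rfl
  | cons t ts ih =>
    rw [mark_cons, dIdxN_cons]
    by_cases hd : PySem.Chars.strIsdigit t
    · simp only [hd, ite_true, show (1 : Int) + 1 = 2 by norm_num, ite_self]
      rw [mark_ge2 g ts 2 (by norm_num)]
      simp
    · simp only [hd, ite_false, Bool.false_eq_true, List.getElem?_map]
      rw [ih]
      cases h : (dIdxN ts)[0]? with
      | none => simp [h]
      | some j => simp [h]

theorem setSecondN (g : List Char → List Char) : ∀ (ts : List (List Char)),
    mark g 0 ts = (match (dIdxN ts)[1]? with
      | some j => ts.set j (g (ts[j]?.getD []))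
      | none => ts) := by
  intro ts
  cases ts with
  | nil => rfl
  | cons t ts =>
    rw [mark_cons, dIdxN_cons]
    by_cases hd : PySem.Chars.strIsdigit t
    · simp only [hd, ite_true, show ¬((0 : Int) + 1 = 2) by norm_num, ite_false]
      rw [show (0 : Int) + 1 = 1 by norm_num, setFirstN g ts]
      simp only [List.getElem?_cons_succ, List.getElem?_map]
      cases h : (dIdxN ts)[0]? with
      | none => simp [h]
      | some j => simp [h]
    · simp only [hd, ite_false, Bool.false_eq_true, List.getElem?_map]
      rw [setSecondN g ts]
      cases h : (dIdxN ts)[1]? with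
      | none => simp [h]
      | some j => simp [h]

theorem good_split : ∀ (s cur : List Char) (acc : List (List Char)),
    (∀ c ∈ cur, PySem.Chars.isspace c = false) → (∀ t ∈ acc, good t) →
    ∀ t ∈ PySem.Chars.split₀.go s cur acc, good t := by
  intro s
  induction s with
  | nil =>
    intro cur acc hcur hacc t ht
    unfold PySem.Chars.split₀.go at ht
    by_cases hc : cur = [] <;> simp [hc] at ht
    · exact hacc t ht
    · rcases ht with ht | ht
      · exact hacc t ht
      · subst ht
        refine ⟨by simpa using hc, ?_⟩
        intro c hcm
        exact hcur c (List.mem_reverse.1 hcm)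
  | cons c rest ih =>
    intro cur acc hcur hacc t ht
    unfold PySem.Chars.split₀.go at ht
    by_cases hsp : PySem.Chars.isspace c <;> simp [hsp] at ht
    · by_cases hc : cur = [] <;> simp [hc] at ht
      · exact ih [] acc (by intro c hc; simp at hc) hacc t ht
      · refine ih [] (cur.reverse :: acc) (by intro c hc; simp at hc) ?_ t ht
        intro u hu
        rcases List.mem_cons.1 hu with hu | hu
        · subst hu
          refine ⟨by simpa using hc, ?_⟩
          intro d hd
          exact hcur d (List.mem_reverse.1 hd)
        · exact hacc u hu
    · refine ih (c :: cur) acc ?_ hacc t ht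
      intro d hd
      rcases List.mem_cons.1 hd with hd | hd
      · subst hd; simpa using hsp
      · exact hcur d hd

theorem digitChar_nonspace : ∀ (k : Nat), PySem.Chars.isspace (Nat.digitChar k) = false
  | 0 => by decide
  | 1 => by decide
  | 2 => by decide
  | 3 => by decide
  | 4 => by decide
  | 5 => by decide
  | 6 => by decide
  | 7 => by decide
  | 8 => by decide
  | 9 => by decide
  | 10 => by decide
  | 11 => by decide
  | 12 => by decide
  | 13 => by decide
  | 14 => by decide
  | 15 => by decide
  | (n+16) => by simp only [Nat.digitChar]; rw [if_neg (by omega), if_neg (by omega), if_neg (by omega), if_neg (by omega), if_neg (by omega), if_neg (by omega), if_neg (by omega), if_neg (by omega), if_neg (by omega), if_neg (by omega), if_neg (by omega), if_neg (by omega), if_neg (by omega), if_neg (by omega), if_neg (by omega), if_neg (by omega)]; decide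

theorem toDigitsCore_ne_nil (b : Nat) : ∀ (fuel n : Nat) (ds : List Char), ds ≠ [] →
    Nat.toDigitsCore b fuel n ds ≠ [] := by
  intro fuel
  induction fuel with
  | zero => intro n ds h; simpa [Nat.toDigitsCore] using h
  | succ fuel ih =>
    intro n ds h
    unfold Nat.toDigitsCore
    dsimp only
    split
    · simp
    · exact ih _ _ (by simp)

theorem toDigitsCore_mem (b : Nat) : ∀ (fuel n : Nat) (ds : List Char) (c : Char),
    c ∈ Nat.toDigitsCore b fuel n ds → c ∈ ds ∨ ∃ k, c = Nat.digitChar k := by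
  intro fuel
  induction fuel with
  | zero => intro n ds c h; simp [Nat.toDigitsCore] at h; simp [h]
  | succ fuel ih =>
    intro n ds c h
    unfold Nat.toDigitsCore at h
    dsimp only at h
    split at h
    · rcases List.mem_cons.1 h with h | h
      · exact Or.inr ⟨_, h⟩
      · simp [h]
    · rcases ih _ _ _ h with h' | h'
      · rcases List.mem_cons.1 h' with h'' | h''
        · exact Or.inr ⟨_, h''⟩
        · simp [h'']
      · exact Or.inr h'

theorem good_toChars (x : Int) : good (PySem.Int.toChars x) := by
  unfold PySem.Int.toChars good
  have hd : ∀ (m : Nat) (c : Char), c ∈ Nat.toDigits 10 m → PySem.Chars.isspace c = false := by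
    intro m c h
    rcases toDigitsCore_mem 10 _ _ _ _ h with h' | ⟨k, hk⟩
    · simp at h'
    · rw [hk]; exact digitChar_nonspace k
  have hne : ∀ (m : Nat), Nat.toDigits 10 m ≠ [] := by
    intro m
    unfold Nat.toDigits Nat.toDigitsCore
    dsimp only
    split
    · simp
    · exact toDigitsCore_ne_nil 10 _ _ _ (by simp)
  split
  · refine ⟨by simp, ?_⟩
    intro c hc
    rcases List.mem_cons.1 hc with h | h
    · rw [h]; decide
    · exact hd _ _ h
  · exact ⟨hne _, fun c hc => hd _ _ hc⟩

theorem sp_eq (t : List Char) (ts : List (List Char)) :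
    sp (t :: ts) = PySem.Chars.join [' '] (t :: ts) ++ [' '] := by
  induction ts generalizing t with
  | nil => simp [sp, PySem.Chars.join_singleton]
  | cons u us ih =>
    rw [PySem.Chars.join_cons_cons]
    show t ++ ' ' :: sp (u :: us) = _
    rw [ih u]
    simp

theorem join_head : ∀ (t : List Char) (ts : List (List Char)), good t →
    ∃ c cs, PySem.Chars.join [' '] (t :: ts) = c :: cs ∧ PySem.Chars.isspace c = false := by
  intro t ts ht
  obtain ⟨c, cs, hc⟩ : ∃ c cs, t = c :: cs := by
    cases t with
    | nil => exact absurd rfl ht.1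
    | cons c cs => exact ⟨c, cs, rfl⟩
  have hcns : PySem.Chars.isspace c = false := ht.2 c (by simp [hc])
  cases ts with
  | nil => exact ⟨c, cs, by simp [PySem.Chars.join_singleton, hc], hcns⟩
  | cons u us =>
    refine ⟨c, cs ++ [' '] ++ PySem.Chars.join [' '] (u :: us), ?_, hcns⟩
    rw [PySem.Chars.join_cons_cons, hc]
    simp

theorem join_rev : ∀ (ts : List (List Char)) (t : List Char), good t → (∀ u ∈ ts, good u) →
    ∃ c cs, (PySem.Chars.join [' '] (t :: ts)).reverse = c :: cs ∧ PySem.Chars.isspace c = false := by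
  intro ts
  induction ts with
  | nil =>
    intro t ht _
    obtain ⟨c, cs, hc⟩ : ∃ c cs, t.reverse = c :: cs := by
      cases h : t.reverse with
      | nil => exact absurd (by simpa using h) ht.1
      | cons c cs => exact ⟨c, cs, rfl⟩
    exact ⟨c, cs, by simp [PySem.Chars.join_singleton, hc], ht.2 c (List.mem_reverse.1 (by simp [hc]))⟩
  | cons u us ih =>
    intro t ht hts
    obtain ⟨c, cs, hc, hcns⟩ := ih u (hts u (by simp)) (fun v hv => hts v (by simp [hv]))
    refine ⟨c, cs ++ ' ' :: t.reverse, ?_, hcns⟩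
    rw [PySem.Chars.join_cons_cons]
    simp [hc]

theorem strip_sp (L : List (List Char)) (h : ∀ t ∈ L, good t) :
    PySem.Chars.strip (sp L) = PySem.Chars.join [' '] L := by
  cases L with
  | nil => rfl
  | cons t ts =>
    rw [sp_eq]
    obtain ⟨c, cs, hhead, hcns⟩ := join_head t ts (h t (by simp))
    obtain ⟨c', cs', hrev, hcns'⟩ := join_rev ts t (h t (by simp)) (fun u hu => h u (by simp [hu]))
    unfold PySem.Chars.strip PySem.Chars.lstrip PySem.Chars.rstrip
    rw [hhead]
    have h1 : List.dropWhile PySem.Chars.isspace ((c :: cs) ++ [' ']) = (c :: cs) ++ [' '] := by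
      rw [List.cons_append, List.dropWhile_cons]
      simp [hcns]
    rw [h1]
    have h2 : ((c :: cs) ++ [' ']).reverse = ' ' :: (c :: cs).reverse := by simp
    rw [h2, List.dropWhile_cons]
    have h3 : List.dropWhile PySem.Chars.isspace (c :: cs).reverse = (c :: cs).reverse := by
      rw [← hhead, hrev, List.dropWhile_cons]
      simp [hcns']
    simp only [show PySem.Chars.isspace ' ' = true by decide, if_pos, h3]
    simp

-- A's loop body, named for the proofs (definitionally equal to the lambda in the port)
def stepA (operation : String) (number : Int) (st : List Char × Int) (number_str : List Char) : List Char × Int :=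
  let modified_element := st.1
  let count := st.2
  if PySem.Chars.strIsdigit number_str then
    let count := count + 1
    if count = 2 then
      if operation = "add" then
        (modified_element ++ PySem.Int.toChars ((PySem.Int.ofChars? number_str).getD 0 + number) ++ [' '], count)
      else if operation = "subtract" then
        (modified_element ++ PySem.Int.toChars ((PySem.Int.ofChars? number_str).getD 0 - number) ++ [' '], count)
      else (modified_element, count)
    else (modified_element ++ number_str ++ [' '], count)
  else (modified_element ++ number_str ++ [' '], count)

theorem stepA_eq (operation : String) (number : Int)
    (hop : operation = "add" ∨ operation = "subtract") (acc : List Char) (count : Int) (t : List Char) :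
    stepA operation number (acc, count) t =
      if PySem.Chars.strIsdigit t then
        if count + 1 = 2 then (acc ++ gop operation number t ++ [' '], count + 1)
        else (acc ++ t ++ [' '], count + 1)
      else (acc ++ t ++ [' '], count) := by
  unfold stepA gop
  rcases hop with hop | hop <;> subst hop <;>
    by_cases hd : PySem.Chars.strIsdigit t <;>
    by_cases h2 : count + 1 = 2 <;>
    simp [hd, h2]

theorem foldA_spec (operation : String) (number : Int)
    (hop : operation = "add" ∨ operation = "subtract") :
    ∀ (toks : List (List Char)) (acc : List Char) (count : Int),
      (toks.foldl (stepA operation number) (acc, count)).1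
      = acc ++ sp (mark (gop operation number) count toks) := by
  intro toks
  induction toks with
  | nil => intro acc count; simp [mark, sp]
  | cons t ts ih =>
    intro acc count
    rw [List.foldl_cons, stepA_eq operation number hop]
    by_cases hd : PySem.Chars.strIsdigit t
    · by_cases h2 : count + 1 = 2 <;>
        simp only [hd, h2, if_true, if_false, ite_true, ite_false] <;>
        rw [ih] <;> simp [mark, sp, hd, h2]
    · simp only [hd, Bool.false_eq_true, if_false, ite_false]
      rw [ih]
      simp [mark, sp, hd]

theorem gop_delta (operation : String) (number : Int)
    (hop : operation = "add" ∨ operation = "subtract") (t : List Char) :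
    gop operation number t = PySem.Int.toChars ((PySem.Int.ofChars? t).getD 0
      + (if operation = "add" then number else -number)) := by
  unfold gop
  rcases hop with h | h <;> subst h <;> simp [Int.sub_eq_add_neg]

theorem elem_eq (operation : String) (number : Int)
    (hop : operation = "add" ∨ operation = "subtract") (element : String) :
    String.mk (PySem.Chars.strip
      (((PySem.Chars.split₀ element.toList).foldl (stepA operation number) ([], 0)).1))
    = String.mk (PySem.Chars.join [' ']
        (match ((PySem.List.enumerate (PySem.Chars.split₀ element.toList)).filterMap
            (fun p => if PySem.Chars.strIsdigit p.2 then some p.1 else none))[1]? with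
          | some j => (PySem.List.pySet? (PySem.Chars.split₀ element.toList) j
              (PySem.Int.toChars ((PySem.Int.ofChars? ((PySem.List.pyGet? (PySem.Chars.split₀ element.toList) j).getD [])).getD 0
                + (if operation = "add" then number else -number)))).getD (PySem.Chars.split₀ element.toList)
          | none => PySem.Chars.split₀ element.toList)) := by
  have hgood : ∀ t ∈ PySem.Chars.split₀ element.toList, good t := by
    intro t ht
    refine good_split element.toList [] [] (by intro c hc; simp at hc) (by intro u hu; simp at hu) t ?_
    exact ht
  rw [foldA_spec operation number hop _ [] 0, List.nil_append,
    strip_sp _ (by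
      intro u hu
      rcases mark_mem _ _ _ _ hu with h | ⟨t, _, rfl⟩
      · exact hgood u h
      · unfold gop; split
        · exact good_toChars _
        · exact good_toChars _)]
  congr 1
  rw [setSecondN (gop operation number) _]
  have hidx := dIdx_eq (PySem.Chars.split₀ element.toList) 0
  simp only [Nat.add_zero, Nat.cast_zero] at hidx
  rw [hidx, List.getElem?_map]
  cases h : (dIdxN (PySem.Chars.split₀ element.toList))[1]? with
  | none => simp
  | some j =>
    have hj : j < (PySem.Chars.split₀ element.toList).length :=
      dIdxN_lt _ j (List.mem_of_getElem? h)
    simp only [Option.map_some]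
    rw [PySem.List.pySet?_natCast _ j _ hj, PySem.List.pyGet?_natCast]
    simp [gop_delta operation number hop]

-- ===== VERDICT (by name: the statement is the Claim_ definition above) =====
theorem modify_hour_spec : Claim_equal_modify_hour := by
  unfold Claim_equal_modify_hour
  intro input_list operation number _ hpre
  unfold Pre_modify_hour at hpre
  unfold Spec_modify_hour modify_hour modify_hour_alt
  rw [if_neg (not_not_intro hpre), if_neg (not_not_intro hpre)]
  dsimp only
  congr 1
  funext r e
  congr 1
  exact congrArg (fun x => [x]) (elem_eq operation number hpre e)
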